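-- pv_equiv track=rewrite | github.com/VenkataChennubhotla/CVSR | sql_ai_advisor_cli.py | _build_conn_str
-- ===== SOURCE A (Python) =====
-- from typing import Any, Dict, Optional, List, Tuple
--
-- def _build_conn_str(parts: Dict[str, str]) -> str:
--     order = [
--         "driver",
--         "server",
--         "database",
--         "uid",
--         "pwd",
--         "trusted_connection",
--         "encrypt",
--         "trustservercertificate",
--         "applicationintent",
--         "multisubnetfailover",
--         "timeout",
--     ]
--     used = set()
--     segments = []
--
--     for k in order:
--         if k in parts and parts[k] != "":
--             segments.append(f"{k.upper()}={parts[k]}")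
--             used.add(k)
--
--     for k, v in parts.items():
--         if k in used:
--             continue
--         if v == "":
--             continue
--         segments.append(f"{k.upper()}={v}")
--
--     return ";".join(segments) + ";"
-- ===== SOURCE B (Python) =====
-- def _build_conn_str(parts):
--     order = [
--         "driver",
--         "server",
--         "database",
--         "uid",
--         "pwd",
--         "trusted_connection",
--         "encrypt",
--         "trustservercertificate",
--         "applicationintent",
--         "multisubnetfailover",
--         "timeout",
--     ]
--     n = len(order)
--     rank = {k: i for i, k in enumerate(order)}
--     tagged = [(rank.get(k, n), f"{k.upper()}={v}") for k, v in parts.items() if v != ""]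
--     segments = [s for i in range(n + 1) for (r, s) in tagged if r == i]
--     return ";".join(segments) + ";"
-- ===== Notes on version B (the rewrite author's own statement) =====
-- stated objective: alternative
-- what changed: Replaces A's two sequential loops with a mutated `used` dedup set by a rank map built from enumerate(order) plus a single tagging pass and a gather-by-rank (counting-sort style) emission; Pre_ excludes association lists with duplicate keys, which represent no Python dict.
import Mathlib
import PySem

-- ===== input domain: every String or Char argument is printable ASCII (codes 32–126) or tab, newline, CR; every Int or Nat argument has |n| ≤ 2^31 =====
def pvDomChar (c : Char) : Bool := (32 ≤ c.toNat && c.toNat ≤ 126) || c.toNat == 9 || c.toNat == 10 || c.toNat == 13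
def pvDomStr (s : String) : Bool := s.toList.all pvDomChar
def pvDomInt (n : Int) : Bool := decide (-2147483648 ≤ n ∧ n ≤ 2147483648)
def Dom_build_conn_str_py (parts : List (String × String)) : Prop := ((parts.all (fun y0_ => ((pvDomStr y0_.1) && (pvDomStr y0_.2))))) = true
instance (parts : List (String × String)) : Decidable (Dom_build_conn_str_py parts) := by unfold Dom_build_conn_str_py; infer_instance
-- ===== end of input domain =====

-- B rebuilds the connection string by tagging each non-empty pair with its rank in `order`
-- (rank map + gather-by-rank) instead of A's two sequential loops with a mutated `used` set;
-- objective: alternative decomposition, same cost. Equivalence is about the return value only.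

-- shared literal data and the f-string segment formatting
def pvOrder : List String :=
  ["driver", "server", "database", "uid", "pwd", "trusted_connection", "encrypt",
   "trustservercertificate", "applicationintent", "multisubnetfailover", "timeout"]

def pvSeg (k v : String) : String := PySem.Str.upper k ++ "=" ++ v

-- ===== PORT A =====
-- body of A's first loop: `if k in parts and parts[k] != "": segments.append(...); used.add(k)`
def pvStepA (d : PySem.Dict String String) (st : List String × PySem.Set String)
    (k : String) : List String × PySem.Set String :=
  match d.get? k with
  | some v => if v ≠ "" then (st.1 ++ [pvSeg k v], PySem.Set.add st.2 k) else st
  | none => st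

-- body of A's second loop (the two `continue`s, then append)
def pvStep2 (u : PySem.Set String) (segs : List String) (kv : String × String) : List String :=
  if PySem.Set.contains u kv.1 then segs
  else if kv.2 = "" then segs
  else segs ++ [pvSeg kv.1 kv.2]

def build_conn_str_py (parts : List (String × String)) : String :=
  let d := PySem.Dict.mk parts
  let st := pvOrder.foldl (pvStepA d) ([], PySem.Set.empty)
  -- `for k, v in parts.items()`: under Pre_ (unique keys) the dict's items are `parts` itself
  let segments := parts.foldl (pvStep2 st.2) st.1
  PySem.Str.join ";" segments ++ ";"

-- ===== PORT B =====
-- rank = {k: i for i, k in enumerate(order)}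
def pvRank : PySem.Dict String Int :=
  pvOrder.zipIdx.foldl (fun d ki => d.insert ki.1 (ki.2 : Int)) PySem.Dict.empty

-- (rank.get(k, n), f"{k.upper()}={v}") for k, v in parts.items() if v != ""
def pvTag (kv : String × String) : Option (Int × String) :=
  if kv.2 ≠ "" then some (PySem.Dict.getD pvRank kv.1 (pvOrder.length : Int), pvSeg kv.1 kv.2)
  else none

def pvPick (i : Int) (rs : Int × String) : Option String :=
  if rs.1 = i then some rs.2 else none

def build_conn_str_py_alt (parts : List (String × String)) : String :=
  let tagged := parts.filterMap pvTag
  let segments :=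
    (PySem.List.pyRange 0 ((pvOrder.length : Int) + 1) 1).flatMap
      (fun i => tagged.filterMap (pvPick i))
  PySem.Str.join ";" segments ++ ";"

-- ===== PRECONDITION & SPEC =====
-- Pre_ excludes association lists with duplicate keys: they represent no Python dict (dict keys
-- are unique), so A's behaviour there is not defined by the source; every real dict input is admitted.
def Pre_build_conn_str_py (parts : List (String × String)) : Prop := (parts.map Prod.fst).Nodup
instance (parts : List (String × String)) : Decidable (Pre_build_conn_str_py parts) := by
  unfold Pre_build_conn_str_py; infer_instance

def pvWitness_build_conn_str_py : (List (String × String)) :=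
  [("server", "localhost"), ("uid", "sa"), ("app", "x"), ("pwd", "")]

def Spec_build_conn_str_py (parts : List (String × String)) (out : String) : Prop :=
  out = build_conn_str_py_alt parts
instance (parts : List (String × String)) (out : String) :
    Decidable (Spec_build_conn_str_py parts out) := by
  unfold Spec_build_conn_str_py; infer_instance

-- ===== CLAIM (what is proved, stated in full; the proofs are below) =====
def Claim_equal_build_conn_str_py : Prop :=
  ∀ (parts : List (String × String)), Dom_build_conn_str_py parts →
    Pre_build_conn_str_py parts →
    Spec_build_conn_str_py parts (build_conn_str_py parts)

-- ===== LEMMAS AND PROOFS =====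

-- what A's first loop contributes for one ordered key
def pvFA (d : PySem.Dict String String) (k : String) : Option String :=
  (d.get? k).bind fun v => if v ≠ "" then some (pvSeg k v) else none

-- closed form of the rank lookup rank.get(k, 11)
def pvChain (k : String) : Int :=
  if "driver" = k then 0 else
  if "server" = k then 1 else
  if "database" = k then 2 else
  if "uid" = k then 3 else
  if "pwd" = k then 4 else
  if "trusted_connection" = k then 5 else
  if "encrypt" = k then 6 else
  if "trustservercertificate" = k then 7 else
  if "applicationintent" = k then 8 else
  if "multisubnetfailover" = k then 9 else
  if "timeout" = k then 10 else
  11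

set_option maxHeartbeats 1000000 in
lemma pvRank_eq : pvRank = PySem.Dict.mk [("driver", 0), ("server", 1), ("database", 2), ("uid", 3), ("pwd", 4), ("trusted_connection", 5), ("encrypt", 6), ("trustservercertificate", 7), ("applicationintent", 8), ("multisubnetfailover", 9), ("timeout", 10)] := by decide

lemma pvRank_getD (k : String) :
    PySem.Dict.getD pvRank k ((pvOrder.length : Nat) : Int) = pvChain k := by
  have h : ((pvOrder.length : Nat) : Int) = 11 := by decide
  have hnil : (PySem.Dict.mk ([] : List (String × Int))).get? k = none := rfl
  rw [pvRank_eq, h]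
  simp only [PySem.Dict.getD, PySem.Dict.get?_mk_cons, beq_iff_eq, hnil,
    apply_ite (fun o : Option Int => o.getD 11),
    Option.getD_some, Option.getD_none]
  unfold pvChain
  rfl

lemma pvChain_eq_0 (k : String) : pvChain k = 0 ↔ k = "driver" := by
  unfold pvChain; split_ifs <;> subst_vars <;> simp_all [eq_comm]
lemma pvChain_eq_1 (k : String) : pvChain k = 1 ↔ k = "server" := by
  unfold pvChain; split_ifs <;> subst_vars <;> simp_all [eq_comm]
lemma pvChain_eq_2 (k : String) : pvChain k = 2 ↔ k = "database" := by
  unfold pvChain; split_ifs <;> subst_vars <;> simp_all [eq_comm]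
lemma pvChain_eq_3 (k : String) : pvChain k = 3 ↔ k = "uid" := by
  unfold pvChain; split_ifs <;> subst_vars <;> simp_all [eq_comm]
lemma pvChain_eq_4 (k : String) : pvChain k = 4 ↔ k = "pwd" := by
  unfold pvChain; split_ifs <;> subst_vars <;> simp_all [eq_comm]
lemma pvChain_eq_5 (k : String) : pvChain k = 5 ↔ k = "trusted_connection" := by
  unfold pvChain; split_ifs <;> subst_vars <;> simp_all [eq_comm]
lemma pvChain_eq_6 (k : String) : pvChain k = 6 ↔ k = "encrypt" := by
  unfold pvChain; split_ifs <;> subst_vars <;> simp_all [eq_comm]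
lemma pvChain_eq_7 (k : String) : pvChain k = 7 ↔ k = "trustservercertificate" := by
  unfold pvChain; split_ifs <;> subst_vars <;> simp_all [eq_comm]
lemma pvChain_eq_8 (k : String) : pvChain k = 8 ↔ k = "applicationintent" := by
  unfold pvChain; split_ifs <;> subst_vars <;> simp_all [eq_comm]
lemma pvChain_eq_9 (k : String) : pvChain k = 9 ↔ k = "multisubnetfailover" := by
  unfold pvChain; split_ifs <;> subst_vars <;> simp_all [eq_comm]
lemma pvChain_eq_10 (k : String) : pvChain k = 10 ↔ k = "timeout" := by
  unfold pvChain; split_ifs <;> subst_vars <;> simp_all [eq_comm]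

lemma pvChain_eq_11 (k : String) : pvChain k = 11 ↔ k ∉ pvOrder := by
  unfold pvChain pvOrder; split_ifs <;> subst_vars <;> simp_all [eq_comm]

lemma pvGetMem (P : List (String × String)) (hnd : (P.map Prod.fst).Nodup)
    {k v} (h : (k, v) ∈ P) : (PySem.Dict.mk P).get? k = some v := by
  induction P with
  | nil => cases h
  | cons hd tl ih =>
    simp only [List.map_cons, List.nodup_cons] at hnd
    rcases List.mem_cons.mp h with h | h
    · subst h; simp [PySem.Dict.get?_mk_cons]
    · have hne : hd.1 ≠ k := by
        intro he
        exact hnd.1 (he ▸ List.mem_map.mpr ⟨(k, v), h, rfl⟩)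
      rw [PySem.Dict.get?_mk_cons]
      simp only [beq_iff_eq, hne, if_false]
      exact ih hnd.2 h

-- first loop of A: collected segments, and membership in `used`
lemma pvLoopA (d : PySem.Dict String String) (L : List String)
    (segs : List String) (s : PySem.Set String) :
    (L.foldl (pvStepA d) (segs, s)).1 = segs ++ L.filterMap (pvFA d) ∧
    ∀ x, (x ∈ (L.foldl (pvStepA d) (segs, s)).2 ↔
      x ∈ s ∨ (x ∈ L ∧ ∃ v, d.get? x = some v ∧ v ≠ "")) := by
  induction L generalizing segs s with
  | nil => simp
  | cons a L ih =>
    simp only [List.foldl_cons]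
    rcases hda : d.get? a with _ | v
    · have hstep : pvStepA d (segs, s) a = (segs, s) := by simp [pvStepA, hda]
      rw [hstep]
      refine ⟨?_, ?_⟩
      · rw [(ih segs s).1, List.filterMap_cons]
        simp [pvFA, hda]
      · intro x
        rw [(ih segs s).2 x]
        constructor
        · rintro (h | ⟨h1, h2⟩)
          · exact Or.inl h
          · exact Or.inr ⟨List.mem_cons_of_mem _ h1, h2⟩
        · rintro (h | ⟨h1, hv, h2, h3⟩)
          · exact Or.inl h
          · rcases List.mem_cons.mp h1 with rfl | h1
            · rw [hda] at h2; cases h2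
            · exact Or.inr ⟨h1, hv, h2, h3⟩
    · by_cases hv : v = ""
      · have hstep : pvStepA d (segs, s) a = (segs, s) := by simp [pvStepA, hda, hv]
        rw [hstep]
        refine ⟨?_, ?_⟩
        · rw [(ih segs s).1, List.filterMap_cons]
          simp [pvFA, hda, hv]
        · intro x
          rw [(ih segs s).2 x]
          constructor
          · rintro (h | ⟨h1, h2⟩)
            · exact Or.inl h
            · exact Or.inr ⟨List.mem_cons_of_mem _ h1, h2⟩
          · rintro (h | ⟨h1, hv', h2, h3⟩)
            · exact Or.inl h
            · rcases List.mem_cons.mp h1 with rfl | h1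
              · rw [hda] at h2; simp_all
              · exact Or.inr ⟨h1, hv', h2, h3⟩
      · have hstep : pvStepA d (segs, s) a = (segs ++ [pvSeg a v], PySem.Set.add s a) := by
          simp [pvStepA, hda, hv]
        rw [hstep]
        refine ⟨?_, ?_⟩
        · rw [(ih _ _).1, List.filterMap_cons]
          simp [pvFA, hda, hv]
        · intro x
          rw [(ih _ _).2 x]
          rw [PySem.Set.mem_add]
          constructor
          · rintro ((h | rfl) | ⟨h1, h2⟩)
            · exact Or.inl h
            · exact Or.inr ⟨List.mem_cons_self, v, hda, hv⟩
            · exact Or.inr ⟨List.mem_cons_of_mem _ h1, h2⟩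
          · rintro (h | ⟨h1, hv', h2, h3⟩)
            · exact Or.inl (Or.inl h)
            · rcases List.mem_cons.mp h1 with rfl | h1
              · exact Or.inl (Or.inr rfl)
              · exact Or.inr ⟨h1, hv', h2, h3⟩

-- second loop of A as a filterMap
lemma pvLoop2 (u : PySem.Set String) (P : List (String × String)) (segs : List String) :
    P.foldl (pvStep2 u) segs =
      segs ++ P.filterMap (fun kv =>
        if PySem.Set.contains u kv.1 then none
        else if kv.2 = "" then none
        else some (pvSeg kv.1 kv.2)) := by
  induction P generalizing segs with
  | nil => simp
  | cons kv P ih =>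
    simp only [List.foldl_cons, List.filterMap_cons, pvStep2]
    by_cases hc : PySem.Set.contains u kv.1 = true
    · rw [if_pos hc, if_pos hc, ih]
    · rw [if_neg hc, if_neg hc]
      by_cases hv : kv.2 = ""
      · rw [if_pos hv, if_pos hv, ih]
      · rw [if_neg hv, if_neg hv, ih]
        simp [List.append_assoc]

-- gathering by a fixed key over a duplicate-free association list = the dict lookup
lemma pvGatherKey (P : List (String × String)) (hnd : (P.map Prod.fst).Nodup) (a : String) :
    P.filterMap (fun kv =>
        if kv.2 = "" then none
        else if kv.1 = a then some (pvSeg kv.1 kv.2) else none) =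
      (pvFA (PySem.Dict.mk P) a).toList := by
  induction P with
  | nil => simp [pvFA, PySem.Dict.get?]
  | cons kv P ih =>
    simp only [List.map_cons, List.nodup_cons] at hnd
    rw [List.filterMap_cons]
    by_cases hk : kv.1 = a
    · have hnone : P.filterMap (fun kv =>
          if kv.2 = "" then none
          else if kv.1 = a then some (pvSeg kv.1 kv.2) else none) = [] := by
        rw [List.filterMap_eq_nil_iff]
        intro x hx
        have hxa : x.1 ≠ a := by
          intro he
          exact hnd.1 (hk ▸ he ▸ List.mem_map.mpr ⟨x, hx, rfl⟩)
        simp [hxa]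
      have hget : (PySem.Dict.mk (kv :: P)).get? a = some kv.2 := by
        rw [PySem.Dict.get?_mk_cons]; simp [hk]
      by_cases hv : kv.2 = "" <;> simp [hv, hk, hnone, pvFA, hget]
    · have hget : (PySem.Dict.mk (kv :: P)).get? a = (PySem.Dict.mk P).get? a := by
        rw [PySem.Dict.get?_mk_cons]; simp [hk]
      have hrec := ih hnd.2
      by_cases hv : kv.2 = "" <;> simp [hv, hk, pvFA, hget] <;>
        simpa [pvFA] using hrec

-- one rank bucket of B, for a rank i < 11 whose key is `a`
lemma pvStage2 (parts : List (String × String)) (hnd : (parts.map Prod.fst).Nodup)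
    (i : Int) (a : String) (hia : ∀ k, pvChain k = i ↔ k = a) :
    parts.filterMap (fun kv => (pvTag kv).bind (pvPick i)) =
      (pvFA (PySem.Dict.mk parts) a).toList := by
  rw [← pvGatherKey parts hnd a]
  apply List.filterMap_congr
  intro kv _
  have hrk : PySem.Dict.getD pvRank kv.1 ((pvOrder.length : Nat) : Int) = pvChain kv.1 :=
    pvRank_getD kv.1
  by_cases hv : kv.2 = ""
  · simp [pvTag, pvPick, hv]
  · by_cases hc : pvChain kv.1 = i
    · have ha : kv.1 = a := (hia kv.1).mp hc
      have hca : pvChain a = i := ha ▸ hc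
      have hrka : PySem.Dict.getD pvRank a ((pvOrder.length : Nat) : Int) = pvChain a :=
        pvRank_getD a
      simp [pvTag, pvPick, hv, ha, hca, hrka]
    · have ha : ¬ kv.1 = a := fun he => hc ((hia kv.1).mpr he)
      simp [pvTag, pvPick, hv, hrk, hc, ha]

-- the overflow bucket (rank 11) of B = the keys outside `order`
lemma pvStage11 (parts : List (String × String)) :
    parts.filterMap (fun kv => (pvTag kv).bind (pvPick 11)) =
      parts.filterMap (fun kv =>
        if kv.2 = "" then none
        else if kv.1 ∈ pvOrder then none
        else some (pvSeg kv.1 kv.2)) := by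
  apply List.filterMap_congr
  intro kv _
  have hrk : PySem.Dict.getD pvRank kv.1 ((pvOrder.length : Nat) : Int) = pvChain kv.1 :=
    pvRank_getD kv.1
  by_cases hv : kv.2 = ""
  · simp [pvTag, pvPick, hv]
  · by_cases hm : kv.1 ∈ pvOrder
    · have hne : pvChain kv.1 ≠ 11 := fun he => ((pvChain_eq_11 kv.1).mp he) hm
      simp [pvTag, pvPick, hv, hrk, hne, hm]
    · have heq : pvChain kv.1 = 11 := (pvChain_eq_11 kv.1).mpr hm
      simp [pvTag, pvPick, hv, hrk, heq, hm]

-- ===== VERDICT (by name: the statement is the Claim_ definition above) =====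
theorem build_conn_str_py_spec : Claim_equal_build_conn_str_py := by
  intro parts _ hnd
  show build_conn_str_py parts = build_conn_str_py_alt parts
  simp only [build_conn_str_py, build_conn_str_py_alt]
  congr 1
  congr 1
  -- A side
  rw [pvLoop2, (pvLoopA (PySem.Dict.mk parts) pvOrder [] PySem.Set.empty).1, List.nil_append]
  have hused := (pvLoopA (PySem.Dict.mk parts) pvOrder [] PySem.Set.empty).2
  have hA2 : parts.filterMap (fun kv =>
        if PySem.Set.contains (pvOrder.foldl (pvStepA (PySem.Dict.mk parts)) ([], PySem.Set.empty)).2 kv.1 then none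
        else if kv.2 = "" then none
        else some (pvSeg kv.1 kv.2)) =
      parts.filterMap (fun kv =>
        if kv.2 = "" then none
        else if kv.1 ∈ pvOrder then none
        else some (pvSeg kv.1 kv.2)) := by
    apply List.filterMap_congr
    intro kv hkv
    have hget : (PySem.Dict.mk parts).get? kv.1 = some kv.2 := by
      rcases kv with ⟨k, v⟩; exact pvGetMem parts hnd hkv
    have hmemu : kv.1 ∈ (pvOrder.foldl (pvStepA (PySem.Dict.mk parts)) ([], PySem.Set.empty)).2
        ↔ (kv.1 ∈ pvOrder ∧ kv.2 ≠ "") := by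
      rw [hused kv.1]
      constructor
      · rintro (h | ⟨h1, v', h2, h3⟩)
        · simp [PySem.Set.empty] at h
        · rw [hget] at h2; cases h2; exact ⟨h1, h3⟩
      · rintro ⟨h1, h2⟩
        exact Or.inr ⟨h1, kv.2, hget, h2⟩
    by_cases hv : kv.2 = ""
    · by_cases hc : PySem.Set.contains (pvOrder.foldl (pvStepA (PySem.Dict.mk parts)) ([], PySem.Set.empty)).2 kv.1 <;>
        simp [hc, hv]
    · by_cases hm : kv.1 ∈ pvOrder
      · have hin : kv.1 ∈ (pvOrder.foldl (pvStepA (PySem.Dict.mk parts)) ([], PySem.Set.empty)).2 :=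
          hmemu.mpr ⟨hm, hv⟩
        rw [if_pos ((PySem.Set.contains_iff _ _).mpr hin)]
        simp [hv, hm]
      · have hout : kv.1 ∉ (pvOrder.foldl (pvStepA (PySem.Dict.mk parts)) ([], PySem.Set.empty)).2 :=
          fun h => hm (hmemu.mp h).1
        rw [if_neg (show ¬ PySem.Set.contains (pvOrder.foldl (pvStepA (PySem.Dict.mk parts)) ([], PySem.Set.empty)).2 kv.1 = true from
          fun h => hout ((PySem.Set.contains_iff _ _).mp h))]
        simp [hv, hm]
  rw [hA2]
  -- B side
  have hr : PySem.List.pyRange 0 ((pvOrder.length : Int) + 1) 1 =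
      [0, 1, 2, 3, 4, 5, 6, 7, 8, 9, 10, 11] := by decide
  rw [hr]
  simp only [List.flatMap_cons, List.flatMap_nil, List.append_nil, List.filterMap_filterMap]
  have hk0 := pvStage2 parts hnd 0 "driver" (pvChain_eq_0)
  have hk1 := pvStage2 parts hnd 1 "server" (pvChain_eq_1)
  have hk2 := pvStage2 parts hnd 2 "database" (pvChain_eq_2)
  have hk3 := pvStage2 parts hnd 3 "uid" (pvChain_eq_3)
  have hk4 := pvStage2 parts hnd 4 "pwd" (pvChain_eq_4)
  have hk5 := pvStage2 parts hnd 5 "trusted_connection" (pvChain_eq_5)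
  have hk6 := pvStage2 parts hnd 6 "encrypt" (pvChain_eq_6)
  have hk7 := pvStage2 parts hnd 7 "trustservercertificate" (pvChain_eq_7)
  have hk8 := pvStage2 parts hnd 8 "applicationintent" (pvChain_eq_8)
  have hk9 := pvStage2 parts hnd 9 "multisubnetfailover" (pvChain_eq_9)
  have hk10 := pvStage2 parts hnd 10 "timeout" (pvChain_eq_10)
  have hk11 := pvStage11 parts
  rw [hk0, hk1, hk2, hk3, hk4, hk5, hk6, hk7, hk8, hk9, hk10, hk11]
  rw [show pvOrder.filterMap (pvFA (PySem.Dict.mk parts)) =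
      pvOrder.flatMap (fun a => (pvFA (PySem.Dict.mk parts) a).toList) from
    List.filterMap_eq_flatMap_toList _ _]
  simp [pvOrder, List.flatMap_cons, List.append_assoc]
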